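-- pv_equiv track=rewrite | github.com/Lanity6/AI-CHAMP-CU-x-ITMO-X5-Tech | vizualizator/vizualizator_multipallet.py | normalize_cases
-- ===== SOURCE A (Python) =====
-- def normalize_cases(inputs_raw, results_raw):
--     input_list = inputs_raw if isinstance(inputs_raw, list) else [inputs_raw]
--     result_list = results_raw if isinstance(results_raw, list) else [results_raw]
--
--     input_by_task_id = {}
--     for input_case in input_list:
--         task_id = input_case.get("task_id")
--         if not task_id:
--             raise ValueError("input.json contains item without task_id")
--         input_by_task_id[task_id] = input_case
--
--     cases = []
--     for idx, result_case in enumerate(result_list):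
--         task_id = result_case.get("task_id")
--         if not task_id:
--             raise ValueError(f"result.json item #{idx} has no task_id")
--
--         input_case = input_by_task_id.get(task_id)
--         if input_case is None:
--             raise ValueError(f"No input case found for task_id '{task_id}'")
--
--         cases.append((input_case, result_case, idx))
--
--     return cases
-- ===== SOURCE B (Python) =====
-- def normalize_cases(inputs_raw, results_raw):
--     input_list = inputs_raw if isinstance(inputs_raw, list) else [inputs_raw]
--     result_list = results_raw if isinstance(results_raw, list) else [results_raw]
--
--     for input_case in input_list:
--         if not input_case.get("task_id"):
--             raise ValueError("input.json contains item without task_id")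
--
--     # Inverted join: record which result positions need each task_id ...
--     need = {}
--     for idx, result_case in enumerate(result_list):
--         task_id = result_case.get("task_id")
--         if not task_id:
--             raise ValueError(f"result.json item #{idx} has no task_id")
--         need.setdefault(task_id, []).append(idx)
--
--     # ... then scatter the inputs into those positions in one pass;
--     # a later input with the same task_id simply overwrites the slot.
--     match = {}
--     for input_case in input_list:
--         for idx in need.get(input_case.get("task_id"), []):
--             match[idx] = input_case
--
--     for task_id, idxs in need.items():
--         if idxs[0] not in match:
--             raise ValueError(f"No input case found for task_id '{task_id}'")
--
--     return [(match[idx], result_case, idx)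
--             for idx, result_case in enumerate(result_list)]
-- ===== Notes on version B (the rewrite author's own statement) =====
-- stated objective: alternative
-- what changed: Reverses the join direction: instead of indexing inputs by task_id and looking each result up, B records which result positions need each task_id (a multimap over results) and then makes one scatter pass over the inputs filling those positions, later inputs overwriting; the output is assembled by result position.
import Mathlib
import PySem

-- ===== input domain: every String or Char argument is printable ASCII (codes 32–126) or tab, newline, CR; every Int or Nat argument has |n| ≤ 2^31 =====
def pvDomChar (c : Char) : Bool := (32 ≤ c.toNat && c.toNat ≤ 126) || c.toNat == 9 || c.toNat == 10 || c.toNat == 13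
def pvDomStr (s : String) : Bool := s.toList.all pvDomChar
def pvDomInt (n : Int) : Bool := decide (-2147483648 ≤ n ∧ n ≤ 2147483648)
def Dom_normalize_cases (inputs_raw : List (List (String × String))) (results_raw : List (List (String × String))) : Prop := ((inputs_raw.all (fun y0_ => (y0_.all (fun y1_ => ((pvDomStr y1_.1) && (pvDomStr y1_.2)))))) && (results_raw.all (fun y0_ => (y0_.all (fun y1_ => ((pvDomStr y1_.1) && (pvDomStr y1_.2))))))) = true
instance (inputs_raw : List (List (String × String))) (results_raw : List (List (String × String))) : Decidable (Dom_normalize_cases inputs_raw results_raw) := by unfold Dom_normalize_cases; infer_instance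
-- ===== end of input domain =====

-- B reverses the join direction: a multimap from task_id to the result positions that
-- need it, then one scatter pass over the inputs filling those positions (objective:
-- alternative; same exception points on validated inputs).

-- ===== PORT A =====

-- .get("task_id") on a case dict (first match in the association list).
def tidOf (c : List (String × String)) : Option String :=
  (PySem.Dict.mk c).get? "task_id"

-- A's first loop: build input_by_task_id; none = the ValueError on a falsy task_id.
def buildIndex : List (List (String × String)) → PySem.Dict String (List (String × String)) →
    Option (PySem.Dict String (List (String × String)))
  | [], d => some d
  | c :: rest, d =>
    match tidOf c with
    | none => none
    | some t => if t = "" then none else buildIndex rest (d.insert t c)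

-- A's second loop over results; none = one of the two ValueErrors.
def joinResults (d : PySem.Dict String (List (String × String))) :
    List (List (String × String)) → Int →
    Option (List ((List (String × String)) × (List (String × String)) × Int))
  | [], _ => some []
  | r :: rest, idx =>
    match tidOf r with
    | none => none
    | some t =>
      if t = "" then none
      else
        match d.get? t with
        | none => none
        | some c => (joinResults d rest (idx + 1)).map (fun cs => (c, r, idx) :: cs)

-- The lists are already lists, so the isinstance wraps are identity.
-- On inputs where the Python raises (excluded by Pre_) the port returns [].
def normalize_cases (inputs_raw : List (List (String × String))) (results_raw : List (List (String × String))) : List ((List (String × String)) × (List (String × String)) × Int) :=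
  match buildIndex inputs_raw PySem.Dict.empty with
  | none => []
  | some d => (joinResults d results_raw 0).getD []

-- ===== PORT B =====

-- B's validation loop over inputs: every case has a truthy task_id.
def okTid (c : List (String × String)) : Bool :=
  match tidOf c with
  | none => false
  | some t => t ≠ ""

-- need.setdefault(task_id, []).append(idx) over enumerate(result_list);
-- none = the ValueError on a falsy result task_id.
def buildNeed : List (List (String × String)) → Int → PySem.Dict String (List Int) →
    Option (PySem.Dict String (List Int))
  | [], _, d => some d
  | r :: rest, idx, d =>
    match tidOf r with
    | none => none
    | some t =>
      if t = "" then none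
      else buildNeed rest (idx + 1) (d.modify t [] (fun l => l ++ [idx]))

-- need.get(input_case.get("task_id"), []): a None key matches no string key.
def idxsOfB (need : PySem.Dict String (List Int)) (c : List (String × String)) : List Int :=
  match tidOf c with
  | none => []
  | some t => need.getD t []

-- the scatter pass: for idx in need.get(...): match[idx] = input_case
def scatter (need : PySem.Dict String (List Int)) :
    List (List (String × String)) → PySem.Dict Int (List (String × String)) →
    PySem.Dict Int (List (String × String))
  | [], m => m
  | c :: rest, m => scatter need rest ((idxsOfB need c).foldl (fun m i => m.insert i c) m)

-- the existence check: idxs[0] in match for every need entry (false = a ValueError;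
-- the IndexError branch of idxs[0] is unreachable for a need built by buildNeed).
def allFound (need : PySem.Dict String (List Int)) (m : PySem.Dict Int (List (String × String))) : Bool :=
  need.items.all (fun p =>
    match PySem.List.pyGet? p.2 0 with
    | none => false
    | some i => m.contains i)

-- the final comprehension over enumerate(result_list); match[idx] KeyError = none.
def assemble (m : PySem.Dict Int (List (String × String))) :
    List (List (String × String)) → Int →
    Option (List ((List (String × String)) × (List (String × String)) × Int))
  | [], _ => some []
  | r :: rest, idx =>
    match m.get? idx with
    | none => none
    | some c => (assemble m rest (idx + 1)).map (fun cs => (c, r, idx) :: cs)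

def normalize_cases_alt (inputs_raw : List (List (String × String))) (results_raw : List (List (String × String))) : List ((List (String × String)) × (List (String × String)) × Int) :=
  if inputs_raw.all okTid then
    match buildNeed results_raw 0 PySem.Dict.empty with
    | none => []
    | some need =>
      let m := scatter need inputs_raw PySem.Dict.empty
      if allFound need m then (assemble m results_raw 0).getD [] else []
  else []

-- ===== PRECONDITION & SPEC =====
-- Pre_ excludes exactly the inputs on which the Python raises ValueError: a case with a
-- missing/empty task_id, or a result whose task_id matches no input case.
def Pre_normalize_cases (inputs_raw : List (List (String × String))) (results_raw : List (List (String × String))) : Prop :=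
  (∀ c ∈ inputs_raw, tidOf c ≠ none ∧ tidOf c ≠ some "") ∧
  (∀ r ∈ results_raw, tidOf r ≠ none ∧ tidOf r ≠ some "" ∧ ∃ c ∈ inputs_raw, tidOf c = tidOf r)
instance (inputs_raw : List (List (String × String))) (results_raw : List (List (String × String))) : Decidable (Pre_normalize_cases inputs_raw results_raw) := by unfold Pre_normalize_cases; infer_instance

def pvWitness_normalize_cases : (List (List (String × String))) × (List (List (String × String))) :=
  ([[("task_id", "a"), ("x", "p")], [("task_id", "b")]],
   [[("task_id", "b"), ("y", "q")], [("task_id", "a")]])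

def Spec_normalize_cases (inputs_raw : List (List (String × String))) (results_raw : List (List (String × String))) (out : List ((List (String × String)) × (List (String × String)) × Int)) : Prop := out = normalize_cases_alt inputs_raw results_raw
instance (inputs_raw : List (List (String × String))) (results_raw : List (List (String × String))) (out : List ((List (String × String)) × (List (String × String)) × Int)) : Decidable (Spec_normalize_cases inputs_raw results_raw out) := by unfold Spec_normalize_cases; infer_instance

-- ===== CLAIM (what is proved, stated in full; the proofs are below) =====
def Claim_equal_normalize_cases : Prop := ∀ (inputs_raw : List (List (String × String))) (results_raw : List (List (String × String))), Dom_normalize_cases inputs_raw results_raw → Pre_normalize_cases inputs_raw results_raw → Spec_normalize_cases inputs_raw results_raw (normalize_cases inputs_raw results_raw)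

-- ===== LEMMAS AND PROOFS =====

-- Proof-side reference value: the last input case with the given task_id.
def lastMatchC (inputs : List (List (String × String))) (t : String) :
    Option (List (String × String)) :=
  inputs.reverse.find? (fun c => tidOf c == some t)

-- Proof-side reference join: per result, the last matching input case.
def joinSpec (inputs : List (List (String × String))) :
    List (List (String × String)) → Int →
    Option (List ((List (String × String)) × (List (String × String)) × Int))
  | [], _ => some []
  | r :: rest, idx =>
    match tidOf r with
    | none => none
    | some t =>
      if t = "" then none
      else
        match lastMatchC inputs t with
        | none => none
        | some c => (joinSpec inputs rest (idx + 1)).map (fun cs => (c, r, idx) :: cs)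

-- enumerate, proof-side.
def tagged : List (List (String × String)) → Int → List (Int × List (String × String))
  | [], _ => []
  | r :: rest, i => (i, r) :: tagged rest (i + 1)

theorem okTid_iff (c : List (String × String)) :
    okTid c = true ↔ (tidOf c ≠ none ∧ tidOf c ≠ some "") := by
  unfold okTid
  cases h : tidOf c with
  | none => simp
  | some t => simp

theorem find?_congr_mem {α : Type} (l : List α) (p q : α → Bool)
    (h : ∀ x ∈ l, p x = q x) : l.find? p = l.find? q := by
  induction l with
  | nil => rfl
  | cons a rest ih =>
    simp only [List.find?]
    rw [h a (by simp)]
    cases q a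
    · exact ih (fun x hx => h x (by simp [hx]))
    · rfl

-- ---- A side ----

theorem buildIndex_eq_some (l : List (List (String × String)))
    (d : PySem.Dict String (List (String × String)))
    (h : ∀ c ∈ l, okTid c = true) :
    buildIndex l d = some (l.foldl (fun d c => d.insert ((tidOf c).getD "") c) d) := by
  induction l generalizing d with
  | nil => simp [buildIndex]
  | cons c rest ih =>
    have hc := h c (by simp)
    have hr : ∀ c' ∈ rest, okTid c' = true := fun c' hm => h c' (by simp [hm])
    unfold okTid at hc
    cases ht : tidOf c with
    | none => simp [ht] at hc
    | some t =>
      rw [ht] at hc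
      have htne : t ≠ "" := by simpa using hc
      simp [buildIndex, ht, htne, ih _ hr]

-- Lookup in the built index = last matching input case.
theorem foldl_insert_get? (l : List (List (String × String)))
    (d : PySem.Dict String (List (String × String))) (t : String)
    (h : ∀ c ∈ l, okTid c = true) :
    (l.foldl (fun d c => d.insert ((tidOf c).getD "") c) d).get? t =
      match l.reverse.find? (fun c => tidOf c == some t) with
      | some c => some c
      | none => d.get? t := by
  induction l generalizing d with
  | nil => simp
  | cons c rest ih =>
    have hc := h c (by simp)
    have hr : ∀ c' ∈ rest, okTid c' = true := fun c' hm => h c' (by simp [hm])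
    unfold okTid at hc
    cases ht : tidOf c with
    | none => simp [ht] at hc
    | some tc =>
      simp only [List.foldl_cons, List.reverse_cons, ht, Option.getD_some]
      rw [ih _ hr, List.find?_append]
      cases hf : rest.reverse.find? (fun c => tidOf c == some t) with
      | some c' => simp
      | none =>
        by_cases he : tc = t
        · subst he
          simp [List.find?, ht, PySem.Dict.get?_insert_self]
        · have hne : (tidOf c == some t) = false := by simp [ht, he]
          have hts : t ≠ tc := fun hh => he hh.symm
          simp [List.find?, hne, PySem.Dict.get?_insert, hts]

theorem joinResults_eq_joinSpec (inputs : List (List (String × String)))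
    (d : PySem.Dict String (List (String × String)))
    (hget : ∀ t, d.get? t = lastMatchC inputs t)
    (rs : List (List (String × String))) (idx : Int) :
    joinResults d rs idx = joinSpec inputs rs idx := by
  induction rs generalizing idx with
  | nil => rfl
  | cons r rest ih =>
    unfold joinResults joinSpec
    cases ht : tidOf r with
    | none => rfl
    | some t =>
      by_cases he : t = ""
      · simp [he]
      · simp only [he, hget t, ih]

-- A's value, characterised through joinSpec.
theorem normalize_cases_eq_spec (inputs results : List (List (String × String)))
    (hin : ∀ c ∈ inputs, okTid c = true) :
    normalize_cases inputs results = (joinSpec inputs results 0).getD [] := by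
  simp only [normalize_cases, buildIndex_eq_some inputs PySem.Dict.empty hin]
  rw [joinResults_eq_joinSpec inputs _ ?_]
  intro t
  rw [foldl_insert_get? inputs PySem.Dict.empty t hin]
  unfold lastMatchC
  cases hf : inputs.reverse.find? (fun c => tidOf c == some t) with
  | some c => simp
  | none => simp [PySem.Dict.get?_empty]

-- ---- B side ----

theorem mem_tagged_snd {p : Int × List (String × String)}
    (rs : List (List (String × String))) (i : Int) (h : p ∈ tagged rs i) : p.2 ∈ rs := by
  induction rs generalizing i with
  | nil => simp [tagged] at h
  | cons r rest ih =>
    simp only [tagged, List.mem_cons] at h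
    rcases h with h | h
    · subst h; simp
    · exact List.mem_cons_of_mem _ (ih _ h)

theorem tagged_fst_ge {p : Int × List (String × String)}
    (rs : List (List (String × String))) (i : Int) (h : p ∈ tagged rs i) : i ≤ p.1 := by
  induction rs generalizing i with
  | nil => simp [tagged] at h
  | cons r rest ih =>
    simp only [tagged, List.mem_cons] at h
    rcases h with h | h
    · subst h; simp
    · have := ih _ h; omega

theorem tagged_inj {j : Int} {r r' : List (String × String)}
    (rs : List (List (String × String))) (i : Int)
    (h : (j, r) ∈ tagged rs i) (h' : (j, r') ∈ tagged rs i) : r = r' := by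
  induction rs generalizing i with
  | nil => simp [tagged] at h
  | cons a rest ih =>
    simp only [tagged, List.mem_cons] at h h'
    rcases h with h | h <;> rcases h' with h' | h'
    · simp only [Prod.mk.injEq] at h h'
      rw [h.2, h'.2]
    · simp only [Prod.mk.injEq] at h
      obtain ⟨h1, -⟩ := h
      have h2 := tagged_fst_ge rest (i + 1) h'
      simp only at h2
      omega
    · simp only [Prod.mk.injEq] at h'
      obtain ⟨h1, -⟩ := h'
      have h2 := tagged_fst_ge rest (i + 1) h
      simp only at h2
      omega
    · exact ih _ h h'

-- buildNeed succeeds on validated results and is the multimap fold.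
theorem buildNeed_eq_some (rs : List (List (String × String))) (i : Int)
    (d : PySem.Dict String (List Int)) (h : ∀ r ∈ rs, okTid r = true) :
    buildNeed rs i d =
      some ((tagged rs i).foldl (fun d p => d.modify ((tidOf p.2).getD "") [] (fun l => l ++ [p.1])) d) := by
  induction rs generalizing i d with
  | nil => simp [buildNeed, tagged]
  | cons r rest ih =>
    have hr := h r (by simp)
    have hrest : ∀ r' ∈ rest, okTid r' = true := fun r' hm => h r' (by simp [hm])
    unfold okTid at hr
    cases ht : tidOf r with
    | none => simp [ht] at hr
    | some t =>
      rw [ht] at hr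
      have htne : t ≠ "" := by simpa using hr
      simp [buildNeed, ht, htne, ih _ _ hrest, tagged]

-- Contents of the built multimap.
theorem need_getD (rs : List (List (String × String))) (i : Int)
    (d : PySem.Dict String (List Int)) (t : String) :
    ((tagged rs i).foldl (fun d p => d.modify ((tidOf p.2).getD "") [] (fun l => l ++ [p.1])) d).getD t []
      = d.getD t [] ++ (((tagged rs i).filter (fun p => (tidOf p.2).getD "" == t)).map (·.1)) := by
  have := PySem.Dict.getD_foldl_modify_append
      ((tagged rs i).map (fun p => ((tidOf p.2).getD "", p.1))) d t
  rw [List.foldl_map] at this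
  rw [this, List.filter_map, List.map_map]
  rfl

theorem mem_need_getD (results : List (List (String × String))) (t : String) (j : Int) :
    j ∈ ((tagged results 0).foldl (fun d p => d.modify ((tidOf p.2).getD "") [] (fun l => l ++ [p.1])) PySem.Dict.empty).getD t []
      ↔ ∃ r, (j, r) ∈ tagged results 0 ∧ (tidOf r).getD "" = t := by
  rw [need_getD, PySem.Dict.getD_empty]
  simp only [List.nil_append, List.mem_map, List.mem_filter]
  constructor
  · rintro ⟨p, ⟨hp, hpt⟩, hj⟩
    exact ⟨p.2, by rw [← hj]; exact hp, by simpa using hpt⟩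
  · rintro ⟨r, hr, ht⟩
    exact ⟨(j, r), ⟨hr, by simpa using ht⟩, rfl⟩

-- One inner insert loop of the scatter pass.
theorem foldl_insertInt_get? (idxs : List Int) (c : List (String × String))
    (m : PySem.Dict Int (List (String × String))) (j : Int) :
    (idxs.foldl (fun m i => m.insert i c) m).get? j =
      if j ∈ idxs then some c else m.get? j := by
  induction idxs generalizing m with
  | nil => simp
  | cons i rest ih =>
    simp only [List.foldl_cons, ih, List.mem_cons]
    by_cases hr : j ∈ rest
    · simp [hr]
    · by_cases hi : j = i
      · simp [hi, PySem.Dict.get?_insert_self]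
      · simp [hi, hr, PySem.Dict.get?_insert]

-- The scatter pass: the last input whose need entry contains j wins.
theorem scatter_get? (need : PySem.Dict String (List Int))
    (l : List (List (String × String)))
    (m : PySem.Dict Int (List (String × String))) (j : Int) :
    (scatter need l m).get? j =
      match l.reverse.find? (fun c => (idxsOfB need c).contains j) with
      | some c => some c
      | none => m.get? j := by
  induction l generalizing m with
  | nil => simp [scatter]
  | cons c rest ih =>
    simp only [scatter, List.reverse_cons]
    rw [ih, List.find?_append]
    cases hf : rest.reverse.find? (fun c => (idxsOfB need c).contains j) with
    | some c' => simp
    | none =>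
      rw [foldl_insertInt_get?]
      by_cases hj : j ∈ idxsOfB need c
      · simp [List.find?, hj]
      · simp [List.find?, hj]

-- assemble = joinSpec, given every slot holds the last matching input case.
theorem assemble_eq_joinSpec (inputs : List (List (String × String)))
    (m : PySem.Dict Int (List (String × String)))
    (rs : List (List (String × String))) (i : Int)
    (hres : ∀ r ∈ rs, okTid r = true)
    (hm : ∀ p ∈ tagged rs i, m.get? p.1 = lastMatchC inputs ((tidOf p.2).getD "")) :
    assemble m rs i = joinSpec inputs rs i := by
  induction rs generalizing i with
  | nil => rfl
  | cons r rest ih =>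
    have hr := hres r (by simp)
    unfold okTid at hr
    cases ht : tidOf r with
    | none => simp [ht] at hr
    | some t =>
      rw [ht] at hr
      have htne : t ≠ "" := by simpa using hr
      have hhead := hm (i, r) (by simp [tagged])
      simp only [ht, Option.getD_some] at hhead
      unfold assemble joinSpec
      rw [hhead, ht]
      simp only [htne, ite_false]
      cases lastMatchC inputs t with
      | none => rfl
      | some c =>
        rw [ih _ (fun r' hm' => hres r' (by simp [hm']))
             (fun p hp => hm p (by simp [tagged, hp]))]

-- ===== VERDICT helper: B's value, characterised through joinSpec =====
theorem normalize_cases_alt_eq_spec (inputs results : List (List (String × String)))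
    (hpre : Pre_normalize_cases inputs results) :
    normalize_cases_alt inputs results = (joinSpec inputs results 0).getD [] := by
  obtain ⟨hin, hres⟩ := hpre
  have hinOk : ∀ c ∈ inputs, okTid c = true := fun c hm => (okTid_iff c).mpr (hin c hm)
  have hresOk : ∀ r ∈ results, okTid r = true := fun r hm =>
    (okTid_iff r).mpr ⟨(hres r hm).1, (hres r hm).2.1⟩
  have hallb : inputs.all okTid = true := by rw [List.all_eq_true]; exact hinOk
  unfold normalize_cases_alt
  rw [buildNeed_eq_some results 0 PySem.Dict.empty hresOk, hallb]
  simp only [if_true]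
  set need := (tagged results 0).foldl (fun d p => d.modify ((tidOf p.2).getD "") [] (fun l => l ++ [p.1])) PySem.Dict.empty with hneed
  set m := scatter need inputs PySem.Dict.empty with hmdef
  -- every slot of m holds the last matching input case
  have hm : ∀ p ∈ tagged results 0, m.get? p.1 = lastMatchC inputs ((tidOf p.2).getD "") := by
    intro p hp
    obtain ⟨htr, htr2, -⟩ := hres p.2 (mem_tagged_snd results 0 hp)
    obtain ⟨tp, htp⟩ := Option.ne_none_iff_exists'.mp htr
    have htpne : tp ≠ "" := by rintro rfl; exact htr2 htp
    rw [hmdef, scatter_get?]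
    have hcong : inputs.reverse.find? (fun c => (idxsOfB need c).contains p.1)
        = inputs.reverse.find? (fun c => tidOf c == some tp) := by
      apply find?_congr_mem
      intro c hc
      obtain ⟨hc1, hc2⟩ := hin c (List.mem_reverse.mp hc)
      obtain ⟨u, hu⟩ := Option.ne_none_iff_exists'.mp hc1
      have hune : u ≠ "" := by rintro rfl; exact hc2 hu
      unfold idxsOfB
      rw [hu]
      simp only [List.contains_eq_mem, hneed]
      rw [Bool.eq_iff_iff]
      simp only [decide_eq_true_eq, mem_need_getD results, beq_iff_eq]
      constructor
      · rintro ⟨r', hr', hu'⟩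
        have hrp : r' = p.2 := tagged_inj results 0 hr' (by exact (by simpa using hp))
        subst hrp
        rw [htp] at hu'
        simp only [Option.getD_some] at hu'
        exact congrArg some hu'.symm
      · intro h
        have huu : tp = u := (Option.some_inj.mp h).symm
        exact ⟨p.2, by simpa using hp, by rw [htp]; simpa using huu⟩
    rw [hcong, htp]
    unfold lastMatchC
    simp only [Option.getD_some]
    cases inputs.reverse.find? (fun c => tidOf c == some tp) <;> rfl
  -- the existence check passes
  have hfound : allFound need m = true := by
    unfold allFound
    rw [List.all_eq_true]
    intro p hp
    obtain ⟨tk, idxs⟩ := p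
    have hnd : need.keys.Nodup := by
      rw [hneed]
      exact PySem.Dict.nodup_keys_foldl_modify_key _ _ _ _ _ PySem.Dict.nodup_keys_empty
    have hgd : need.getD tk [] = idxs := PySem.Dict.getD_of_mem_items need hp hnd []
    -- the entry is nonempty: its key came from some tagged result
    have hkey : tk ∈ need.keys := PySem.Dict.mem_keys_of_mem_items need hp
    have hne : idxs ≠ [] := by
      intro hnil
      rw [hneed, PySem.Dict.keys_foldl_modify_key] at hkey
      rw [PySem.Dict.keys_empty] at hkey
      rw [PySem.Set.update_nil_left] at hkey
      have := (PySem.Set.mem_ofList _ _).mp hkey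
      obtain ⟨q, hq, hqt⟩ := List.mem_map.mp this
      have : q.1 ∈ need.getD tk [] := by
        rw [hneed, mem_need_getD results]
        exact ⟨q.2, by simpa using hq, hqt⟩
      rw [hgd, hnil] at this
      simp at this
    obtain ⟨i0, rest0, h0⟩ := List.exists_cons_of_ne_nil hne
    have hpg : PySem.List.pyGet? idxs 0 = some i0 := by
      rw [h0]; simp [PySem.List.pyGet?, PySem.List.pyIdx?]
    rw [hpg]
    have hi0 : i0 ∈ need.getD tk [] := by rw [hgd, h0]; simp
    rw [hneed, mem_need_getD results] at hi0
    obtain ⟨r0, hr0, hr0t⟩ := hi0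
    obtain ⟨ht1, ht2, c0, hc0, hc0t⟩ := hres r0 (mem_tagged_snd results 0 hr0)
    obtain ⟨t0, ht0⟩ := Option.ne_none_iff_exists'.mp ht1
    have hlm : (lastMatchC inputs ((tidOf r0).getD "")).isSome := by
      unfold lastMatchC
      rw [List.find?_isSome]
      exact ⟨c0, List.mem_reverse.mpr hc0, by rw [hc0t, ht0]; simp⟩
    have hmg := hm (i0, r0) hr0
    simp only at hmg
    show m.contains i0 = true
    rw [PySem.Dict.contains_eq_isSome_get?, hmg]
    exact hlm
  rw [hfound]
  simp only [if_true]
  rw [assemble_eq_joinSpec inputs m results 0 hresOk hm]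

-- ===== VERDICT (by name: the statement is the Claim_ definition above) =====
theorem normalize_cases_spec : Claim_equal_normalize_cases := by
  intro inputs results _ hpre
  unfold Spec_normalize_cases
  rw [normalize_cases_alt_eq_spec inputs results hpre]
  exact normalize_cases_eq_spec inputs results
    (fun c hm => (okTid_iff c).mpr (hpre.1 c hm))
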